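-- pv_equiv track=rewrite | github.com/cyberlytics/Stockbird | sys-src/stock/src/stock_fetch_symbols_german.py | addGermEnd
-- ===== SOURCE A (Python) =====
-- def addGermEnd(listeAlt):
--     liste = [] # leere Liste für die Ausgabe
--     #erstes Attribut listeAlt ist "Abk" daher ersetzt
--     DE = listeAlt.copy()
--     DE[0] = "Deutsche Boerse XETRA"
--     BM = listeAlt.copy()
--     BM[0] = "Bremen Stock Exchange"
--     BE = listeAlt.copy()
--     BE[0] = "Berlin Stock Exchange"
--     DU = listeAlt.copy()
--     DU[0] = "Dusseldorf Stock Exchange"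
--     F = listeAlt.copy()
--     F[0] = "Frankfurt Stock Exchange"
--     HM = listeAlt.copy()
--     HM[0] = "Hamburg Stock Exchange"
--     HA = listeAlt.copy()
--     HA[0] = "Hanover Stock Exchange"
--     MU = listeAlt.copy()
--     MU[0] = "Munic Stock Exchange"
--     SG = listeAlt.copy()
--     SG[0] = "Stuttgard Stock Exchange"
--     DE = listeAlt.copy()
--     DE[0] = "Deutsche Boerse XETRA"
--
--     x = 1
--     while x < len(listeAlt):
--         DE[x] += ".DE"
--         BM[x] += ".BM"
--         BE[x] += ".BE"
--         DU[x] += ".DU"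
--         F[x] += ".F"
--         HM[x] += ".HM"
--         HA[x] += ".HA"
--         MU[x] += ".MU"
--         SG[x] += ".SG"
--         x += 1
--
--     liste.extend(DE)
--     liste.extend(BM)
--     liste.extend(BE)
--     liste.extend(DU)
--     liste.extend(F)
--     liste.extend(HM)
--     liste.extend(HA)
--     liste.extend(MU)
--     liste.extend(SG)
--     return liste
-- ===== SOURCE B (Python) =====
-- _NAMES = [
--     "Deutsche Boerse XETRA",
--     "Bremen Stock Exchange",
--     "Berlin Stock Exchange",
--     "Dusseldorf Stock Exchange",
--     "Frankfurt Stock Exchange",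
--     "Hamburg Stock Exchange",
--     "Hanover Stock Exchange",
--     "Munic Stock Exchange",
--     "Stuttgard Stock Exchange",
-- ]
-- _SUFFIXES = [".DE", ".BM", ".BE", ".DU", ".F", ".HM", ".HA", ".MU", ".SG"]
--
-- def addGermEnd(listeAlt):
--     n = len(listeAlt)
--     liste = []
--     for k in range(9 * n):
--         block, pos = divmod(k, n)
--         if pos == 0:
--             liste.append(_NAMES[block])
--         else:
--             liste.append(listeAlt[pos] + _SUFFIXES[block])
--     return liste
-- ===== Notes on version B (the rewrite author's own statement) =====
-- stated objective: alternative
-- what changed: Replaces A's nine per-exchange list copies mutated by an index-walking while loop with a single flat loop over the 9*n output positions that computes each element directly from divmod index arithmetic (block = exchange, pos = source index), never copying or mutating any list.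
-- outside the precondition, e.g. on addGermEnd([]): A raises IndexError, B returns []
-- crash fix: On the empty list A raises IndexError at 'DE[0] = ...' while B's loop over range(0) returns the empty list. — e.g. on addGermEnd([]): A raises IndexError, B returns []
import Mathlib
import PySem

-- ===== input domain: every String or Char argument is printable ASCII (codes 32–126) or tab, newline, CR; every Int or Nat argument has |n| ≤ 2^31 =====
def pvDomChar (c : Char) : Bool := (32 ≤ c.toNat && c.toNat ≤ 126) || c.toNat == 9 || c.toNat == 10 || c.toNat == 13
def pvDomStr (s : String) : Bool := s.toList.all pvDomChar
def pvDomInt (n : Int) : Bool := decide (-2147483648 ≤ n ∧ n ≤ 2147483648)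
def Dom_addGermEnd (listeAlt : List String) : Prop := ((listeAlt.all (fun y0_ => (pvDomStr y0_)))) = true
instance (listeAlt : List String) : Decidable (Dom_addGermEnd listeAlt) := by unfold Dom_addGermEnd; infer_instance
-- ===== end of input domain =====

-- B replaces A's nine mutated list copies and while loop by one flat loop over the 9*n output
-- positions, computing each element directly with divmod index arithmetic (no copies, no mutation).

-- ===== PORT A =====
-- Python A: nine copies of listeAlt, each with index 0 overwritten by the exchange name
-- ('DE[0] = …' raises IndexError on []; Pre_ excludes that, so List.set 0 is exact here),
-- then a while loop x = 1 .. len-1 appending the suffix at index x of every copy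
-- (ported as a foldl over List.range' 1 (len-1) with the 9-tuple of lists as state),
-- then the nine lists extended onto 'liste' in order.
def addGermEnd (listeAlt : List String) : List String :=
  let liste : List String := []
  let DE := listeAlt.set 0 "Deutsche Boerse XETRA"
  let BM := listeAlt.set 0 "Bremen Stock Exchange"
  let BE := listeAlt.set 0 "Berlin Stock Exchange"
  let DU := listeAlt.set 0 "Dusseldorf Stock Exchange"
  let F := listeAlt.set 0 "Frankfurt Stock Exchange"
  let HM := listeAlt.set 0 "Hamburg Stock Exchange"
  let HA := listeAlt.set 0 "Hanover Stock Exchange"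
  let MU := listeAlt.set 0 "Munic Stock Exchange"
  let SG := listeAlt.set 0 "Stuttgard Stock Exchange"
  let DE := listeAlt.set 0 "Deutsche Boerse XETRA"  -- Python re-assigns DE a second time
  let st := (List.range' 1 (listeAlt.length - 1)).foldl
    (fun (s : List String × List String × List String × List String × List String ×
              List String × List String × List String × List String) x =>
      (s.1.modify x (fun v => v ++ ".DE"),
       s.2.1.modify x (fun v => v ++ ".BM"),
       s.2.2.1.modify x (fun v => v ++ ".BE"),
       s.2.2.2.1.modify x (fun v => v ++ ".DU"),
       s.2.2.2.2.1.modify x (fun v => v ++ ".F"),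
       s.2.2.2.2.2.1.modify x (fun v => v ++ ".HM"),
       s.2.2.2.2.2.2.1.modify x (fun v => v ++ ".HA"),
       s.2.2.2.2.2.2.2.1.modify x (fun v => v ++ ".MU"),
       s.2.2.2.2.2.2.2.2.modify x (fun v => v ++ ".SG")))
    (DE, BM, BE, DU, F, HM, HA, MU, SG)
  liste ++ st.1 ++ st.2.1 ++ st.2.2.1 ++ st.2.2.2.1 ++ st.2.2.2.2.1 ++
    st.2.2.2.2.2.1 ++ st.2.2.2.2.2.2.1 ++ st.2.2.2.2.2.2.2.1 ++ st.2.2.2.2.2.2.2.2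

-- ===== PORT B =====
def pvNames : List String :=
  ["Deutsche Boerse XETRA", "Bremen Stock Exchange", "Berlin Stock Exchange",
   "Dusseldorf Stock Exchange", "Frankfurt Stock Exchange", "Hamburg Stock Exchange",
   "Hanover Stock Exchange", "Munic Stock Exchange", "Stuttgard Stock Exchange"]
def pvSuffixes : List String := [".DE", ".BM", ".BE", ".DU", ".F", ".HM", ".HA", ".MU", ".SG"]

-- Source B: one loop over range(9*n); divmod(k, n) with n > 0 (the loop body only runs when n > 0)
-- is exactly Nat division/remainder; _NAMES[block] and listeAlt[pos] are always in range when
-- reached, so getD with a dummy default is exact there.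
def addGermEnd_alt (listeAlt : List String) : List String :=
  let n := listeAlt.length
  (List.range (9 * n)).foldl
    (fun liste k =>
      let block := k / n
      let pos := k % n
      liste ++ [if pos = 0 then pvNames.getD block ""
                else listeAlt.getD pos "" ++ pvSuffixes.getD block ""])
    []

-- ===== PRECONDITION & SPEC =====
-- Pre_ excludes only the empty list, on which Python A raises IndexError at 'DE[0] = …'.
def Pre_addGermEnd (listeAlt : List String) : Prop := listeAlt ≠ []
instance (listeAlt : List String) : Decidable (Pre_addGermEnd listeAlt) := by unfold Pre_addGermEnd; infer_instance
def pvWitness_addGermEnd : List String := ["AAA", "BMW"]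

-- On the empty list A raises IndexError while B's loop over range(0) returns the empty list.
def Raises_addGermEnd (listeAlt : List String) : Prop := listeAlt = []
instance (listeAlt : List String) : Decidable (Raises_addGermEnd listeAlt) := by unfold Raises_addGermEnd; infer_instance
def pvRaiseWitness_addGermEnd : List String := []
def pvRaiseWitnessOut_addGermEnd : List String := []

def Spec_addGermEnd (listeAlt : List String) (out : List String) : Prop := out = addGermEnd_alt listeAlt
instance (listeAlt : List String) (out : List String) : Decidable (Spec_addGermEnd listeAlt out) := by unfold Spec_addGermEnd; infer_instance

-- ===== CLAIM (what is proved, stated in full; the proofs are below) =====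
def Claim_equal_addGermEnd : Prop := ∀ (listeAlt : List String), Dom_addGermEnd listeAlt → Pre_addGermEnd listeAlt → Spec_addGermEnd listeAlt (addGermEnd listeAlt)
def Claim_raises_addGermEnd : Prop := (∀ (listeAlt : List String), Dom_addGermEnd listeAlt → Raises_addGermEnd listeAlt → ¬ Pre_addGermEnd listeAlt) ∧ (Dom_addGermEnd (pvRaiseWitness_addGermEnd) ∧ Raises_addGermEnd (pvRaiseWitness_addGermEnd) ∧ addGermEnd_alt (pvRaiseWitness_addGermEnd) = pvRaiseWitnessOut_addGermEnd)

-- ===== LEMMAS AND PROOFS =====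

-- A-side: modifying only indices ≥ 1 leaves the head alone (shift the index down onto the tail)
lemma foldl_modify_shift (f : String → String) (l : List Nat) :
    ∀ (c : String) (t : List String),
      l.foldl (fun s x => s.modify (x + 1) f) (c :: t)
        = c :: l.foldl (fun s x => s.modify x f) t := by
  induction l with
  | nil => intro c t; rfl
  | cons a l ih =>
      intro c t
      simp only [List.foldl_cons, List.modify_succ_cons]
      exact ih c _

-- A-side: modifying every index of t with f is mapping f over t
lemma foldl_modify_range (f : String → String) :
    ∀ (t : List String),
      (List.range t.length).foldl (fun s x => s.modify x f) t = t.map f := by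
  intro t
  induction t with
  | nil => rfl
  | cons a t ih =>
      simp only [List.length_cons, List.range_succ_eq_map, List.foldl_cons,
        List.modify_zero_cons, List.foldl_map]
      rw [foldl_modify_shift, ih, List.map_cons]

-- A-side: the 9-tuple fold of A's while loop splits into nine independent folds
lemma foldl9 (l : List Nat)
    (a b c d e f g i j : List String) :
    l.foldl
      (fun (s : List String × List String × List String × List String × List String ×
                List String × List String × List String × List String) x =>
        (s.1.modify x (fun v => v ++ ".DE"),
         s.2.1.modify x (fun v => v ++ ".BM"),
         s.2.2.1.modify x (fun v => v ++ ".BE"),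
         s.2.2.2.1.modify x (fun v => v ++ ".DU"),
         s.2.2.2.2.1.modify x (fun v => v ++ ".F"),
         s.2.2.2.2.2.1.modify x (fun v => v ++ ".HM"),
         s.2.2.2.2.2.2.1.modify x (fun v => v ++ ".HA"),
         s.2.2.2.2.2.2.2.1.modify x (fun v => v ++ ".MU"),
         s.2.2.2.2.2.2.2.2.modify x (fun v => v ++ ".SG")))
      (a, b, c, d, e, f, g, i, j)
    = (l.foldl (fun s x => s.modify x (fun v => v ++ ".DE")) a,
       l.foldl (fun s x => s.modify x (fun v => v ++ ".BM")) b,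
       l.foldl (fun s x => s.modify x (fun v => v ++ ".BE")) c,
       l.foldl (fun s x => s.modify x (fun v => v ++ ".DU")) d,
       l.foldl (fun s x => s.modify x (fun v => v ++ ".F")) e,
       l.foldl (fun s x => s.modify x (fun v => v ++ ".HM")) f,
       l.foldl (fun s x => s.modify x (fun v => v ++ ".HA")) g,
       l.foldl (fun s x => s.modify x (fun v => v ++ ".MU")) i,
       l.foldl (fun s x => s.modify x (fun v => v ++ ".SG")) j) := by
  induction l generalizing a b c d e f g i j with
  | nil => rfl
  | cons hd tl ih =>
      simp only [List.foldl_cons]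
      exact ih _ _ _ _ _ _ _ _ _

-- A-side: one exchange block of A: set head, then append suffix at indices 1..len-1
lemma block_eq (h : String) (t : List String) (nm suf : String) :
    (List.range' 1 t.length).foldl
        (fun s x => s.modify x (fun v => v ++ suf)) ((h :: t).set 0 nm)
      = nm :: t.map (fun v => v ++ suf) := by
  rw [List.range'_eq_map_range, List.foldl_map, List.set_cons_zero]
  simp only [Nat.add_comm 1]
  rw [foldl_modify_shift, foldl_modify_range]

-- B-side: appending singletons in a fold is mapping
lemma foldl_append_singleton {α β : Type} (g : α → β) (l : List α) :
    ∀ acc : List β, l.foldl (fun out k => out ++ [g k]) acc = acc ++ l.map g := by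
  induction l with
  | nil => intro acc; simp
  | cons a l ih => intro acc; simp [List.foldl_cons, ih]

-- B-side: range (m*n) mapped splits into m blocks of n
lemma range_mul_flatMap {β : Type} (n : Nat) (F : Nat → β) :
    ∀ m : Nat, (List.range (m * n)).map F
      = (List.range m).flatMap (fun b => (List.range n).map (fun p => F (b * n + p))) := by
  intro m
  induction m with
  | zero => simp
  | succ m ih =>
      rw [Nat.succ_mul, List.range_add, List.map_append, ih, List.range_succ,
        List.flatMap_append, List.map_map]
      simp [Function.comp_def, Nat.add_comm]

-- B-side: recovering a list from getD over its index range
lemma map_getD_range (t : List String) :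
    (List.range t.length).map (fun q => t.getD q "") = t := by
  induction t with
  | nil => rfl
  | cons a t ih =>
      simp only [List.length_cons, List.range_succ_eq_map, List.map_cons, List.map_map]
      simpa [Function.comp_def] using ih

-- B-side: one block of B's flat loop, evaluated by index arithmetic
lemma alt_block (h : String) (t : List String) (b : Nat) :
    (List.range (h :: t).length).map
        (fun p => if (b * (h :: t).length + p) % (h :: t).length = 0
          then pvNames.getD ((b * (h :: t).length + p) / (h :: t).length) ""
          else (h :: t).getD ((b * (h :: t).length + p) % (h :: t).length) ""
            ++ pvSuffixes.getD ((b * (h :: t).length + p) / (h :: t).length) "")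
      = pvNames.getD b "" :: t.map (fun v => v ++ pvSuffixes.getD b "") := by
  have hn : 0 < (h :: t).length := by simp
  rw [show (List.range (h :: t).length) = 0 :: (List.range t.length).map (· + 1) by
      simp [List.length_cons, List.range_succ_eq_map]]
  rw [List.map_cons, List.map_map]
  congr 1
  · simp [Nat.mul_mod_left]
  · rw [List.map_congr_left (l := List.range t.length)
      (g := fun q => t.getD q "" ++ pvSuffixes.getD b "") ?_]
    · conv_rhs => rw [← map_getD_range t]
      simp [List.map_map, Function.comp_def]
    · intro q hq
      have hq' : q < t.length := List.mem_range.mp hq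
      have hlt : q + 1 < (h :: t).length := by simp; omega
      have hmod : (b * (h :: t).length + (q + 1)) % (h :: t).length = q + 1 := by
        rw [Nat.mul_add_mod_self_right]
        exact Nat.mod_eq_of_lt hlt
      have hdiv : (b * (h :: t).length + (q + 1)) / (h :: t).length = b := by
        rw [Nat.mul_comm b, Nat.mul_add_div hn, Nat.div_eq_of_lt hlt, Nat.add_zero]
      simp only [Function.comp_def, hmod, hdiv]
      simp

-- B's flat loop on h :: t equals the nine concatenated blocks
lemma alt_eq_blocks (h : String) (t : List String) :
    addGermEnd_alt (h :: t)
      = (List.range 9).flatMap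
          (fun b => pvNames.getD b "" :: t.map (fun v => v ++ pvSuffixes.getD b "")) := by
  unfold addGermEnd_alt
  rw [foldl_append_singleton, List.nil_append, range_mul_flatMap]
  congr 1
  funext b
  exact alt_block h t b

-- ===== VERDICT (by name: the statement is the Claim_ definition above) =====
theorem addGermEnd_spec : Claim_equal_addGermEnd := by
  intro listeAlt _ hpre
  obtain ⟨h, t, rfl⟩ := List.exists_cons_of_ne_nil hpre
  unfold Spec_addGermEnd
  rw [alt_eq_blocks]
  unfold addGermEnd
  simp only [List.length_cons, Nat.add_sub_cancel]
  rw [foldl9]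
  rw [block_eq, block_eq, block_eq, block_eq, block_eq, block_eq, block_eq, block_eq, block_eq]
  simp [List.range_succ, List.append_assoc, pvNames, pvSuffixes]

@[simp]
theorem addGermEnd_raises : Claim_raises_addGermEnd := by
  unfold Claim_raises_addGermEnd
  exact ⟨fun l _ hr hp => hp hr, by decide⟩
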